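-- pv_equiv track=rewrite | github.com/Smirsi/DailyNonogram | scripts/generate_puzzles.py | has_empty_line
-- ===== SOURCE A (Python) =====
-- from typing import List, Tuple, Optional, Dict, Any
--
-- def has_empty_line(grid: List[List[int]]) -> bool:
--     rows, cols = len(grid), len(grid[0])
--     for r in range(rows):
--         if all(grid[r][c] == 0 for c in range(cols)):
--             return True
--     for c in range(cols):
--         if all(grid[r][c] == 0 for r in range(rows)):
--             return True
--     return False
-- ===== SOURCE B (Python) =====
-- def has_empty_line(grid):
--     rows, cols = len(grid), len(grid[0])
--     col_has_nonzero = [False] * cols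
--     for row in grid:
--         row_all_zero = True
--         for c in range(cols):
--             if row[c] != 0:
--                 row_all_zero = False
--                 col_has_nonzero[c] = True
--         if row_all_zero:
--             return True
--     return not all(col_has_nonzero)
-- ===== Notes on version B (the rewrite author's own statement) =====
-- stated objective: alternative
-- what changed: Replaced A's two separate scans (row pass, then a second pass in transpose order) by one row-major traversal that maintains a per-column has-nonzero flag table and decides both questions in a single pass.
-- outside the precondition, e.g. on has_empty_line([[1, 2], [3]]): A returns False, B raises IndexError
import Mathlib
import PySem

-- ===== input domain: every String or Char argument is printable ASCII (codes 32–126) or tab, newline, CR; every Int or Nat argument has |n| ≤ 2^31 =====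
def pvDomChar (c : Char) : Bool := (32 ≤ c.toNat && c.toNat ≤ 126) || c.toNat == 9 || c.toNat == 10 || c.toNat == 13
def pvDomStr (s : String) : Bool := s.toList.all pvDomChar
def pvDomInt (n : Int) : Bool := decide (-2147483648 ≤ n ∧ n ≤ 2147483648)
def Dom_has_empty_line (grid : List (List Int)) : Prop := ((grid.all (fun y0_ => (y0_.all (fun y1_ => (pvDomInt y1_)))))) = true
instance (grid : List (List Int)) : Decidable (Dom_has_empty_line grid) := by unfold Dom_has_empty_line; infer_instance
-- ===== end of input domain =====

-- B replaces A's two separate scans (row scan, then a second scan in transpose order) by one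
-- row-major pass that maintains a per-column has-nonzero flag table.

-- ===== PORT A =====
-- A: rows, cols = len(grid), len(grid[0]); scan rows for an all-zero row, then columns.
-- Indices r, c come from range() and are in bounds on Pre_, so getD with a Nat index is exact there.
def has_empty_line (grid : List (List Int)) : Bool :=
  let rows := grid.length
  let cols := (grid.headD []).length
  if (List.range rows).any (fun r => (List.range cols).all (fun c => (grid.getD r []).getD c 0 == 0)) then
    true
  else if (List.range cols).any (fun c => (List.range rows).all (fun r => (grid.getD r []).getD c 0 == 0)) then
    true
  else
    false

-- ===== PORT B =====
-- inner loop of Source B: for c in range(cols): if row[c] != 0: row_all_zero = False; flags[c] = True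
-- (state = (row_all_zero, col_has_nonzero); cols = flags.length by construction)
def pvScanRow (row : List Int) (flags : List Bool) : Bool × List Bool :=
  (List.range flags.length).foldl
    (fun st c => if row.getD c 0 != 0 then (false, st.2.set c true) else st)
    (true, flags)

-- outer loop of Source B with its early return, then 'not all(col_has_nonzero)'
def pvLoopB : List (List Int) → List Bool → Bool
  | [], flags => !(flags.all id)
  | row :: rest, flags =>
      if (pvScanRow row flags).1 then true else pvLoopB rest (pvScanRow row flags).2

def has_empty_line_alt (grid : List (List Int)) : Bool :=
  let cols := (grid.headD []).length
  pvLoopB grid (List.replicate cols false)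

-- ===== PRECONDITION & SPEC =====
-- Pre_ excludes the empty grid, where both Pythons raise IndexError on grid[0], and grids
-- with a row shorter than the first row, where either Python may raise IndexError (and where
-- A, when its short-circuiting generators happen not to reach a missing cell, returns a value
-- that is an accident of its two-scan order which B's single full-row pass cannot match
-- without raising).
def Pre_has_empty_line (grid : List (List Int)) : Prop :=
  grid ≠ [] ∧ ∀ row ∈ grid, (grid.headD []).length ≤ row.length
instance (grid : List (List Int)) : Decidable (Pre_has_empty_line grid) := by
  unfold Pre_has_empty_line; infer_instance

def pvWitness_has_empty_line : List (List Int) := [[1, 0], [0, 3]]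

def Spec_has_empty_line (grid : List (List Int)) (out : Bool) : Prop := out = has_empty_line_alt grid
instance (grid : List (List Int)) (out : Bool) : Decidable (Spec_has_empty_line grid out) := by unfold Spec_has_empty_line; infer_instance

-- ===== CLAIM (what is proved, stated in full; the proofs are below) =====
def Claim_equal_has_empty_line : Prop := ∀ (grid : List (List Int)), Dom_has_empty_line grid → Pre_has_empty_line grid → Spec_has_empty_line grid (has_empty_line grid)

-- ===== LEMMAS AND PROOFS =====

theorem getD_set_self (l : List Bool) (i : Nat) (b : Bool) (h : i < l.length) :
    (l.set i b).getD i false = b := by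
  simp [List.getD_eq_getElem?_getD, h]

theorem getD_set_ne (l : List Bool) (i k : Nat) (b : Bool) (h : i ≠ k) :
    (l.set i b).getD k false = l.getD k false := by
  simp [List.getD_eq_getElem?_getD, List.getElem?_set, h]

-- characterisation of pvScanRow's fold cut off after the first n columns:
-- flags keep their length, the first component says 'all scanned cells are zero',
-- and flag k is ORed with 'column k was scanned and is nonzero in this row'
theorem pvScanRow_aux (row : List Int) (flags : List Bool) (n : Nat) (hn : n ≤ flags.length) :
    ((List.range n).foldl
      (fun st c => if row.getD c 0 != 0 then (false, st.2.set c true) else st)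
      ((true : Bool), flags)).2.length = flags.length ∧
    ((List.range n).foldl
      (fun st c => if row.getD c 0 != 0 then (false, st.2.set c true) else st)
      ((true : Bool), flags)).1 = (List.range n).all (fun c => row.getD c 0 == 0) ∧
    ∀ k, ((List.range n).foldl
      (fun st c => if row.getD c 0 != 0 then (false, st.2.set c true) else st)
      ((true : Bool), flags)).2.getD k false
        = (flags.getD k false || (decide (k < n) && row.getD k 0 != 0)) := by
  induction n with
  | zero => simp
  | succ n ih =>
    obtain ⟨hl, h1, h2⟩ := ih (by omega)
    rw [List.range_succ, List.foldl_append, List.all_append]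
    simp only [List.foldl_cons, List.foldl_nil, List.all_cons, List.all_nil, Bool.and_true]
    by_cases hz : (row.getD n 0 != 0) = true
    · rw [if_pos hz]
      have hbz : (row.getD n 0 == 0) = false := by
        revert hz; cases h : (row.getD n 0 == 0) <;> simp_all
      refine ⟨by simpa using hl, by rw [hbz, Bool.and_false], fun k => ?_⟩
      by_cases hk : n = k
      · subst hk
        have hlt : n < flags.length := by omega
        rw [getD_set_self _ _ _ (by rw [hl]; exact hlt), hz]
        simp
      · rw [getD_set_ne _ _ _ _ hk, h2 k]
        have hd : decide (k < n + 1) = decide (k < n) := by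
          rw [decide_eq_decide]; omega
        rw [hd]
    · rw [if_neg hz]
      have hbz : (row.getD n 0 == 0) = true := by
        revert hz; cases h : (row.getD n 0 == 0) <;> simp_all
      refine ⟨hl, by rw [h1, hbz, Bool.and_true], fun k => ?_⟩
      rw [h2 k]
      by_cases hk : k = n
      · subst hk
        have : (row.getD k 0 != 0) = false := by
          revert hz; cases h : (row.getD k 0 != 0) <;> simp_all
        rw [this, Bool.and_false, Bool.and_false]
      · have hd : decide (k < n + 1) = decide (k < n) := by
          rw [decide_eq_decide]; omega
        rw [hd]

theorem all_id_eq_range (flags : List Bool) :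
    flags.all id = (List.range flags.length).all (fun c => flags.getD c false) := by
  rw [Bool.eq_iff_iff, List.all_eq_true, List.all_eq_true]
  constructor
  · intro h c hc
    rw [List.mem_range] at hc
    rw [List.getD_eq_getElem?_getD, List.getElem?_eq_getElem hc]
    exact h _ (List.getElem_mem hc)
  · intro h b hb
    obtain ⟨i, hi, rfl⟩ := List.mem_iff_getElem.mp hb
    have := h i (List.mem_range.mpr hi)
    rwa [List.getD_eq_getElem?_getD, List.getElem?_eq_getElem hi] at this

theorem all_congr' {α : Type} (l : List α) (f g : α → Bool) (h : ∀ a ∈ l, f a = g a) :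
    l.all f = l.all g := by
  induction l with
  | nil => rfl
  | cons a l ih =>
    simp only [List.all_cons, h a (List.mem_cons_self), ih (fun b hb => h b (List.mem_cons_of_mem a hb))]

-- invariant of Source B's outer loop: the result is 'some remaining row is all zero, or some
-- column flag can no longer become true'
theorem pvLoopB_spec (cols : Nat) (rest : List (List Int)) :
    ∀ flags : List Bool, flags.length = cols →
    pvLoopB rest flags =
      (rest.any (fun row => (List.range cols).all (fun c => row.getD c 0 == 0)) ||
       !((List.range cols).all (fun c =>
          flags.getD c false || rest.any (fun row => row.getD c 0 != 0)))) := by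
  induction rest with
  | nil =>
    intro flags h
    rw [show pvLoopB [] flags = !(flags.all id) from rfl]
    rw [all_id_eq_range, h]
    simp
  | cons row rest ih =>
    intro flags h
    obtain ⟨hl, h1, h2⟩ := pvScanRow_aux row flags flags.length (le_refl _)
    have hl' : (pvScanRow row flags).2.length = cols := by rw [pvScanRow, hl, h]
    have h1' : (pvScanRow row flags).1 = (List.range cols).all (fun c => row.getD c 0 == 0) := by
      rw [pvScanRow, h1, h]
    rw [show pvLoopB (row :: rest) flags
        = (if (pvScanRow row flags).1 then true else pvLoopB rest (pvScanRow row flags).2) from rfl]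
    by_cases hz : (pvScanRow row flags).1 = true
    · rw [if_pos hz]
      have hrow : (List.range cols).all (fun c => row.getD c 0 == 0) = true := by
        rw [← h1']; exact hz
      rw [List.any_cons, hrow, Bool.true_or, Bool.true_or]
    · rw [if_neg hz, ih _ hl']
      have hrow : (List.range cols).all (fun c => row.getD c 0 == 0) = false := by
        rw [← h1']; exact Bool.eq_false_iff.mpr hz
      rw [List.any_cons, hrow, Bool.false_or]
      have hall : ((List.range cols).all (fun c =>
            (pvScanRow row flags).2.getD c false || rest.any fun row => row.getD c 0 != 0))
          = ((List.range cols).all (fun c =>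
            flags.getD c false || (row :: rest).any fun row => row.getD c 0 != 0)) := by
        apply all_congr'
        intro c hc
        rw [List.mem_range] at hc
        have hst : (pvScanRow row flags).2.getD c false
            = (flags.getD c false || (decide (c < flags.length) && row.getD c 0 != 0)) := by
          rw [pvScanRow]; exact h2 c
        rw [hst, h, decide_eq_true hc, Bool.true_and, List.any_cons, Bool.or_assoc]
      rw [hall]

theorem any_range_getD {α : Type} (l : List α) (d : α) (p : α → Bool) :
    (List.range l.length).any (fun r => p (l.getD r d)) = l.any p := by
  rw [Bool.eq_iff_iff, List.any_eq_true, List.any_eq_true]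
  constructor
  · rintro ⟨r, hr, hp⟩
    rw [List.mem_range] at hr
    rw [List.getD_eq_getElem?_getD, List.getElem?_eq_getElem hr] at hp
    exact ⟨_, List.getElem_mem hr, hp⟩
  · rintro ⟨a, ha, hp⟩
    obtain ⟨i, hi, rfl⟩ := List.mem_iff_getElem.mp ha
    refine ⟨i, List.mem_range.mpr hi, ?_⟩
    rwa [List.getD_eq_getElem?_getD, List.getElem?_eq_getElem hi]

theorem all_range_getD {α : Type} (l : List α) (d : α) (p : α → Bool) :
    (List.range l.length).all (fun r => p (l.getD r d)) = l.all p := by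
  rw [Bool.eq_iff_iff, List.all_eq_true, List.all_eq_true]
  constructor
  · intro h a ha
    obtain ⟨i, hi, rfl⟩ := List.mem_iff_getElem.mp ha
    have := h i (List.mem_range.mpr hi)
    rwa [List.getD_eq_getElem?_getD, List.getElem?_eq_getElem hi] at this
  · intro h r hr
    rw [List.mem_range] at hr
    rw [List.getD_eq_getElem?_getD, List.getElem?_eq_getElem hr]
    exact h _ (List.getElem_mem hr)

theorem getD_replicate_false (n c : Nat) : (List.replicate n false).getD c false = false := by
  rw [List.getD_eq_getElem?_getD, List.getElem?_replicate]
  split <;> rfl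

theorem any_congr' {α : Type} (l : List α) (f g : α → Bool) (h : ∀ a ∈ l, f a = g a) :
    l.any f = l.any g := by
  induction l with
  | nil => rfl
  | cons a l ih =>
    simp only [List.any_cons, h a (List.mem_cons_self), ih (fun b hb => h b (List.mem_cons_of_mem a hb))]

-- A's column scan ('some column is all zero') equals the complement of B's flag test
-- ('every column saw a nonzero')
theorem any_all_not (cols : Nat) (grid : List (List Int)) :
    (List.range cols).any (fun c => grid.all (fun row => row.getD c 0 == 0))
      = !((List.range cols).all (fun c => grid.any (fun row => row.getD c 0 != 0))) := by
  rw [Bool.eq_iff_iff]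
  simp only [List.any_eq_true, List.all_eq_true, Bool.not_eq_true', List.all_eq_false,
    beq_iff_eq, bne_iff_ne, ne_eq]
  push_neg
  rfl

theorem ports_agree (grid : List (List Int)) : has_empty_line grid = has_empty_line_alt grid := by
  unfold has_empty_line has_empty_line_alt
  rw [pvLoopB_spec ((grid.headD []).length) grid _ (List.length_replicate)]
  have hif : ∀ a b : Bool, (if a then true else if b then true else false) = (a || b) := by decide
  rw [hif, any_range_getD grid []
    (fun row => (List.range (grid.headD []).length).all fun c => row.getD c 0 == 0)]
  congr 1
  rw [any_congr' (List.range (grid.headD []).length) _ _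
    (fun c _ => all_range_getD grid [] (fun row => row.getD c 0 == 0))]
  simp only [getD_replicate_false, Bool.false_or]
  rw [any_all_not]

-- ===== VERDICT (by name: the statement is the Claim_ definition above) =====
theorem has_empty_line_spec : Claim_equal_has_empty_line :=
  fun grid _ _ => ports_agree grid
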